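-- pv_equiv track=rewrite | github.com/dipprog/web-security | 9.Authentication-Vuln/Lab-06/auth-lab06.py | get_credentials_list
-- ===== SOURCE A (Python) =====
-- def get_credentials_list(password_list):
--     extra_length = len(password_list) // 2
--     new_total_length = len(password_list) + extra_length
--     username_list = []
--     new_password_list = []
--
--     # Getting usernames list
--     for i in range(new_total_length):
--         if (i + 1) % 3:
--             username_list.append("carlos")
--         else:
--             username_list.append("wiener")
--
--     # Getting passwords list
--     j = 0
--     for i in range(new_total_length):
--         if (i + 1) % 3:
--             new_password_list.append(password_list[j])
--             j = j + 1
--         else: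
--             new_password_list.append("peter")
--
--     return (username_list, new_password_list)
-- ===== SOURCE B (Python) =====
-- def get_credentials_list(password_list):
--     # One pass over the password list in steps of 2: each complete pair yields
--     # the block carlos/carlos/wiener and the two passwords + "peter"; an odd
--     # leftover password yields one plain carlos entry.
--     usernames = []
--     passwords = []
--     k = 0
--     while k + 1 < len(password_list):
--         usernames += ["carlos", "carlos", "wiener"]
--         passwords += [password_list[k], password_list[k + 1], "peter"]
--         k += 2
--     if len(password_list) % 2:
--         usernames.append("carlos")
--         passwords.append(password_list[-1])
--     return (usernames, passwords)
-- ===== Notes on version B (the rewrite author's own statement) =====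
-- stated objective: simpler
-- what changed: Replaced the two modulo-indexed loops over a precomputed expanded length (n + n//2) by a single structural recursion that consumes the password list two entries at a time, emitting one three-element block per pair and a plain tail entry for an odd leftover.
import Mathlib
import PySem

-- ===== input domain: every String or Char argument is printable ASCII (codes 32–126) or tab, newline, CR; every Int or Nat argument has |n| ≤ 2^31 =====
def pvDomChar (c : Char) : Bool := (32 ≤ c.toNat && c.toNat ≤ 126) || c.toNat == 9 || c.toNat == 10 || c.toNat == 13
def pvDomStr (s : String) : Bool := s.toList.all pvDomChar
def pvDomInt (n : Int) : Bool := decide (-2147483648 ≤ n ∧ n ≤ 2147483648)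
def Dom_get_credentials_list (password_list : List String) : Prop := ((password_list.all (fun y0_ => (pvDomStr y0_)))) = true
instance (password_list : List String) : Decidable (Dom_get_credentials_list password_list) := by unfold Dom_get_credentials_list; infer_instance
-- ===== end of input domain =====

-- B replaces A's two modulo-indexed loops over a precomputed expanded length (n + n//2)
-- by one pair-chunked pass over the password list itself (objective: simpler).

-- ===== PORT A =====
-- A-side helpers: the two loop bodies of A (each iteration appends to an accumulator).
def pvUnameStep (acc : List String) (i : Nat) : List String :=
  if (i + 1) % 3 ≠ 0 then acc ++ ["carlos"] else acc ++ ["wiener"]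

-- password_list[j]: j is always a valid index in A (the count of non-"peter" slots in
-- range(new_total_length) is exactly len(password_list)), so getD with a default is exact here.
def pvPwStep (pl : List String) (st : Nat × List String) (i : Nat) : Nat × List String :=
  if (i + 1) % 3 ≠ 0 then (st.1 + 1, st.2 ++ [pl.getD st.1 ""]) else (st.1, st.2 ++ ["peter"])

def get_credentials_list (password_list : List String) : List String × List String :=
  let extra_length := password_list.length / 2
  let new_total_length := password_list.length + extra_length
  let username_list := (List.range new_total_length).foldl pvUnameStep []
  let new_password_list := ((List.range new_total_length).foldl (pvPwStep password_list) (0, [])).2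
  (username_list, new_password_list)

-- ===== PORT B =====
-- B's while loop over k in steps of 2: the state is the two accumulated lists plus the
-- not-yet-consumed suffix of password_list (k+1 < len ↔ at least two elements remain);
-- the trailing if-odd branch is the one-element case.
def pvAltGo (usernames passwords : List String) : List String → List String × List String
  | a :: b :: rest =>
      pvAltGo (usernames ++ ["carlos", "carlos", "wiener"]) (passwords ++ [a, b, "peter"]) rest
  | [a] => (usernames ++ ["carlos"], passwords ++ [a])
  | [] => (usernames, passwords)

def get_credentials_list_alt (password_list : List String) : List String × List String :=
  pvAltGo [] [] password_list

-- ===== PRECONDITION & SPEC =====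
def Spec_get_credentials_list (password_list : List String) (out : List String × List String) : Prop := out = get_credentials_list_alt password_list
instance (password_list : List String) (out : List String × List String) : Decidable (Spec_get_credentials_list password_list out) := by unfold Spec_get_credentials_list; infer_instance

-- ===== CLAIM (what is proved, stated in full; the proofs are below) =====
def Claim_equal_get_credentials_list : Prop := ∀ (password_list : List String), Dom_get_credentials_list password_list → Spec_get_credentials_list password_list (get_credentials_list password_list)

-- ===== LEMMAS AND PROOFS =====

def pvG (i : Nat) : String := if (i + 1) % 3 ≠ 0 then "carlos" else "wiener"

lemma uname_eq_map : ∀ (l : List Nat) (acc : List String),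
    l.foldl pvUnameStep acc = acc ++ l.map pvG := by
  intro l
  induction l with
  | nil => intro acc; simp
  | cons i l ih =>
      intro acc
      simp only [List.foldl_cons, List.map_cons, ih, pvUnameStep, pvG]
      split <;> simp

lemma g_shift (i : Nat) : pvG (3 + i) = pvG i := by
  simp [pvG, show (3 + i + 1) % 3 = (i + 1) % 3 by omega]

lemma pw_factor (pl : List String) : ∀ (l : List Nat) (j : Nat) (acc : List String),
    l.foldl (pvPwStep pl) (j, acc) =
      ((l.foldl (pvPwStep pl) (j, [])).1, acc ++ (l.foldl (pvPwStep pl) (j, [])).2) := by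
  intro l
  induction l with
  | nil => intro j acc; simp
  | cons i l ih =>
      intro j acc
      simp only [List.foldl_cons, pvPwStep]
      split
      · rw [ih (j + 1) (acc ++ [pl.getD j ""]), ih (j + 1) ([] ++ [pl.getD j ""])]; simp
      · rw [ih j (acc ++ ["peter"]), ih j ([] ++ ["peter"])]; simp

lemma pw_shift (a b : String) (rest : List String) :
    ∀ (l : List Nat) (j : Nat) (acc : List String),
    (l.map (3 + ·)).foldl (pvPwStep (a :: b :: rest)) (j + 2, acc) =
      ((l.foldl (pvPwStep rest) (j, [])).1 + 2,
       acc ++ (l.foldl (pvPwStep rest) (j, [])).2) := by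
  intro l
  induction l with
  | nil => intro j acc; simp
  | cons i l ih =>
      intro j acc
      have hmod : (3 + i + 1) % 3 = (i + 1) % 3 := by omega
      have hget : (a :: b :: rest).getD (j + 2) "" = rest.getD j "" := by
        show (a :: b :: rest).getD (j + 1 + 1) "" = rest.getD j ""
        simp
      simp only [List.map_cons, List.foldl_cons, pvPwStep, hmod, hget]
      split
      · have h1 := ih (j + 1) (acc ++ [rest.getD j ""])
        rw [show j + 2 + 1 = j + 1 + 2 by omega, h1,
          pw_factor rest l (j + 1) ([] ++ [rest.getD j ""])]
        simp
      · rw [ih j (acc ++ ["peter"]), pw_factor rest l j ([] ++ ["peter"])]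
        simp

-- A on a list with ≥ 2 elements: one leading carlos/carlos/wiener (resp. pw/pw/peter) block,
-- then A of the tail.
lemma A_cons2 (a b : String) (rest : List String) :
    get_credentials_list (a :: b :: rest)
      = ("carlos" :: "carlos" :: "wiener" :: (get_credentials_list rest).1,
         a :: b :: "peter" :: (get_credentials_list rest).2) := by
  have hN : (a :: b :: rest).length + (a :: b :: rest).length / 2
      = 3 + (rest.length + rest.length / 2) := by simp; omega
  simp only [get_credentials_list, hN]
  rw [List.range_add, Prod.mk.injEq]
  constructor
  · rw [uname_eq_map, uname_eq_map, List.map_append, List.map_map,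
      show pvG ∘ (fun x => 3 + x) = pvG from funext g_shift]
    rfl
  · rw [show List.range 3 = [0, 1, 2] from rfl, List.foldl_append,
      show ([0, 1, 2] : List Nat).foldl (pvPwStep (a :: b :: rest)) (0, [])
        = (2, [a, b, "peter"]) from rfl]
    have h2 := pw_shift a b rest (List.range (rest.length + rest.length / 2)) 0 [a, b, "peter"]
    simp only [Nat.zero_add] at h2
    rw [h2]
    simp

-- B's loop, started with any accumulators, produces them followed by A's two lists.
lemma go_eq : ∀ (l us ps : List String),
    pvAltGo us ps l = (us ++ (get_credentials_list l).1, ps ++ (get_credentials_list l).2)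
  | a :: b :: rest, us, ps => by
      rw [pvAltGo, go_eq rest, A_cons2]
      simp
  | [a], us, ps => by
      rw [pvAltGo]
      simp [get_credentials_list, List.range_succ, pvUnameStep, pvPwStep]
  | [], us, ps => by
      rw [pvAltGo]
      simp [get_credentials_list]

lemma main_eq (pl : List String) : get_credentials_list pl = get_credentials_list_alt pl := by
  rw [get_credentials_list_alt, go_eq pl [] []]
  simp

-- ===== VERDICT (by name: the statement is the Claim_ definition above) =====
theorem get_credentials_list_spec : Claim_equal_get_credentials_list := by
  intro pl _
  unfold Spec_get_credentials_list
  exact main_eq pl
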